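-- pv_equiv track=rewrite | github.com/RunXPS/Procedural | Daily_Notes/21_9_30/odd_sorts.py | adjacent_neighbors
-- ===== SOURCE A (Python) =====
-- def swap(x,j,k):
--     if j != k:
--         x[j], x[k] = x[k], x[j]
--
-- def adjacent_neighbors(x):
--     """
--     1) looks at last two
--     2) swaps if first is bigger
--     3) move pointer back one
--     4) repeat
--     """
--     p = len(x)-1
--     while p > 0:
--         largest = 0
--         index = p - 1
--         if x[p] < x[index]:
--             swap(x, p, index)
--         p -= 1
--     return x
-- ===== SOURCE B (Python) =====
-- def adjacent_neighbors(x):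
--     """Closed form of the right-to-left swap pass: the first slot becomes the
--     list minimum carried in by the pass, and each later slot j becomes the max
--     of its left neighbour and the minimum of the original suffix starting at j.
--     Computes the suffix-minimum table in one appending sweep, then writes the
--     result back into x in place."""
--     if not x:
--         return x
--     suf = [x[-1]]
--     for v in reversed(x[:-1]):
--         suf.append(min(v, suf[-1]))
--     suf.reverse()
--     x[:] = [suf[0]] + [max(a, s) for a, s in zip(x, suf[1:])]
--     return x
-- ===== Notes on version B (the rewrite author's own statement) =====
-- stated objective: alternative
-- what changed: Instead of simulating the conditional-swap pass, B computes the pass's closed form: it builds the suffix-minimum table of the list in one sweep, then writes the table's first entry followed by, for each later slot, the max of the left neighbour and the table entry, back into the list.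
import Mathlib
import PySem

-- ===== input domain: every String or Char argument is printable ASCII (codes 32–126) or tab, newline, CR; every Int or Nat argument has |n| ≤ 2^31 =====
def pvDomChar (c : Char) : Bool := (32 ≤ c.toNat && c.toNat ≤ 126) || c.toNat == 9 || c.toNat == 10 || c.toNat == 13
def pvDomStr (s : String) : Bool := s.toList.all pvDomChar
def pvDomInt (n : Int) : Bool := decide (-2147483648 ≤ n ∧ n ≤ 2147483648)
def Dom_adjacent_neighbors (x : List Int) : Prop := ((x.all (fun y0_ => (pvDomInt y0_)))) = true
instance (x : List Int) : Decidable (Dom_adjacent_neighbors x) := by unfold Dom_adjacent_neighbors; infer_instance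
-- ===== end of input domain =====

-- B replaces A's conditional-swap simulation by the pass's closed form (suffix
-- minima, then a pairwise-max map); both Pythons mutate the argument list in
-- place identically, the theorems are about the returned value.

-- ===== PORT A =====
-- helper swap(x, j, k); the indices A passes are in range, so set/getD are exact
def pySwap (x : List Int) (j k : Nat) : List Int :=
  if j ≠ k then (x.set j (x.getD k 0)).set k (x.getD j 0) else x

-- the while loop of A: pointer p going down to 0
def aLoop (x : List Int) (p : Nat) : List Int :=
  match p with
  | 0 => x
  | q + 1 =>
      aLoop (if x.getD (q + 1) 0 < x.getD q 0 then pySwap x (q + 1) q else x) q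

def adjacent_neighbors (x : List Int) : List Int :=
  aLoop x (x.length - 1)

-- ===== PORT B =====
-- the suffix-minimum sweep: for v in reversed(x[:-1]): suf.append(min(v, suf[-1]))
-- (suf is never empty here, so reading suf[-1] via pyGet? … |>.getD 0 is exact)
def bSufLoop (vs : List Int) (suf : List Int) : List Int :=
  match vs with
  | [] => suf
  | v :: rest => bSufLoop rest (suf ++ [min v ((PySem.List.pyGet? suf (-1)).getD 0)])

def adjacent_neighbors_alt (x : List Int) : List Int :=
  if x = [] then x
  else
    -- suf = [x[-1]]; sweep; suf.reverse()   (x ≠ [], so x[-1] via pyGet? … |>.getD 0 is exact)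
    let suf := (bSufLoop (PySem.List.slice x none (some (-1))).reverse
                  [(PySem.List.pyGet? x (-1)).getD 0]).reverse
    -- [suf[0]] + [max(a, s) for a, s in zip(x, suf[1:])]
    (PySem.List.pyGet? suf 0).getD 0 ::
      ((x.zip (PySem.List.slice suf (some 1) none)).map (fun p => max p.1 p.2))

-- ===== PRECONDITION & SPEC =====
def Spec_adjacent_neighbors (x : List Int) (out : List Int) : Prop := out = adjacent_neighbors_alt x
instance (x : List Int) (out : List Int) : Decidable (Spec_adjacent_neighbors x out) := by unfold Spec_adjacent_neighbors; infer_instance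

-- ===== CLAIM (what is proved, stated in full; the proofs are below) =====
def Claim_equal_adjacent_neighbors : Prop := ∀ (x : List Int), Dom_adjacent_neighbors x → Spec_adjacent_neighbors x (adjacent_neighbors x)

-- ===== LEMMAS AND PROOFS =====

-- the common recursion both programs turn out to satisfy: one conditional
-- exchange of the first two elements
def step1 : List Int → List Int
  | a :: b :: r => if b < a then b :: a :: r else a :: b :: r
  | l => l

-- ---- A side ----

theorem aStep_cons (a : Int) (t : List Int) (q : Nat) :
    (if (a :: t).getD (q + 2) 0 < (a :: t).getD (q + 1) 0
       then pySwap (a :: t) (q + 2) (q + 1) else (a :: t))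
    = a :: (if t.getD (q + 1) 0 < t.getD q 0 then pySwap t (q + 1) q else t) := by
  simp only [List.getD_cons_succ]
  by_cases h : t.getD (q + 1) 0 < t.getD q 0
  · rw [if_pos h, if_pos h]
    simp [pySwap, List.getD]
  · rw [if_neg h, if_neg h]

theorem aShift (p : Nat) : ∀ (a : Int) (t : List Int), p < t.length →
    aLoop (a :: t) (p + 1) = step1 (a :: aLoop t p) := by
  induction p with
  | zero =>
      intro a t ht
      match t, ht with
      | b :: r, _ =>
        by_cases h : b < a
        · simp [aLoop, List.getD, h, pySwap, step1]
        · simp [aLoop, List.getD, h, step1]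
  | succ q ih =>
      intro a t ht
      show aLoop (if (a :: t).getD (q + 2) 0 < (a :: t).getD (q + 1) 0
          then pySwap (a :: t) (q + 2) (q + 1) else (a :: t)) (q + 1) = _
      rw [aStep_cons]
      have hl2 : (if t.getD (q + 1) 0 < t.getD q 0 then pySwap t (q + 1) q else t).length
          = t.length := by
        split
        · simp only [pySwap]; split <;> simp
        · rfl
      have hlen : q < (if t.getD (q + 1) 0 < t.getD q 0 then pySwap t (q + 1) q else t).length := by
        rw [hl2]; omega
      rw [ih a _ hlen]
      conv_rhs => rw [aLoop]

theorem A_cons (a : Int) (t : List Int) :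
    adjacent_neighbors (a :: t) = step1 (a :: adjacent_neighbors t) := by
  match t with
  | [] => rfl
  | b :: r =>
      unfold adjacent_neighbors
      have h : (a :: b :: r).length - 1 = ((b :: r).length - 1) + 1 := by simp
      rw [h, aShift _ _ _ (by simp)]

-- ---- B side ----

theorem bSufLoop_ne_nil (vs : List Int) : ∀ suf : List Int, suf ≠ [] →
    bSufLoop vs suf ≠ [] := by
  induction vs with
  | nil => intro suf h; exact h
  | cons v rest ih => intro suf _; exact ih _ (by simp)

theorem bSufLoop_append (vs : List Int) (a : Int) : ∀ suf : List Int,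
    bSufLoop (vs ++ [a]) suf
      = bSufLoop vs suf ++ [min a ((PySem.List.pyGet? (bSufLoop vs suf) (-1)).getD 0)] := by
  induction vs with
  | nil => intro suf; rfl
  | cons v rest ih => intro suf; exact ih _

-- B's suffix table for a longer list is a conditional extension of the tail's table
theorem B_cons (a : Int) (t : List Int) (ht : t ≠ []) :
    adjacent_neighbors_alt (a :: t) = step1 (a :: adjacent_neighbors_alt t) := by
  unfold adjacent_neighbors_alt
  rw [if_neg (by simp), if_neg ht]
  simp only [PySem.List.slice_to_neg_one, PySem.List.slice_from_one,
    PySem.List.pyGet?_neg_one]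
  have hdl : (a :: t).dropLast = a :: t.dropLast := List.dropLast_cons_of_ne_nil ht
  have hlast : (a :: t).getLast? = t.getLast? := by
    match t with | b :: r => simp [List.getLast?_cons_cons]
  rw [hdl, hlast]
  set c : Int := t.getLast?.getD 0 with hc
  set r := bSufLoop t.dropLast.reverse [c] with hr
  have hrne : r ≠ [] := bSufLoop_ne_nil _ _ (by simp)
  have hstep : bSufLoop (a :: t.dropLast).reverse [c]
      = r ++ [min a ((PySem.List.pyGet? r (-1)).getD 0)] := by
    rw [List.reverse_cons, bSufLoop_append]
  rw [hstep, List.reverse_append]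
  set h : Int := (PySem.List.pyGet? r (-1)).getD 0 with hh
  -- r.reverse (the tail's suffix table) is nonempty with head h
  have hhd : r.reverse = h :: r.reverse.tail := by
    have : r.reverse ≠ [] := by simpa using hrne
    match hv : r.reverse, this with
    | y :: ys, _ =>
        have : h = y := by
          rw [hh, PySem.List.pyGet?_neg_one]
          have : r.getLast? = some y := by
            rw [← List.head?_reverse, hv]; rfl
          simp [this]
        simp [this]
  simp only [List.reverse_singleton, List.singleton_append]
  rw [hhd]
  simp only [PySem.List.pyGet?_zero_cons, Option.getD_some, List.tail_cons,
    List.zip_cons_cons, List.map_cons, step1]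
  by_cases hlt : h < a
  · rw [if_pos hlt, min_eq_right (le_of_lt hlt), max_eq_left (le_of_lt hlt)]
  · rw [if_neg hlt, min_eq_left (le_of_not_gt hlt), max_eq_right (le_of_not_gt hlt)]

theorem AB_eq (x : List Int) : adjacent_neighbors x = adjacent_neighbors_alt x := by
  induction x with
  | nil => rfl
  | cons a t ih =>
      rw [A_cons, ih]
      match t with
      | [] => rfl
      | b :: r => rw [B_cons a _ (by simp)]

-- ===== VERDICT (by name: the statement is the Claim_ definition above) =====
theorem adjacent_neighbors_spec : Claim_equal_adjacent_neighbors := by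
  intro x _
  exact AB_eq x
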